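-- pv_equiv track=rewrite | github.com/mariatupik/My-Python-Journey | MOOC-University/mooc_p4_more_functions.py | second_word
-- ===== SOURCE A (Python) =====
-- def second_word(sentence):
--     i = 0
--     while sentence[i] != " ":
--         i += 1
--     start = i + 1
--     i = start
--     while i < len(sentence) and sentence[i] != " ":
--         i += 1
--     return sentence[start:i]
-- ===== SOURCE B (Python) =====
-- def second_word(sentence):
--     return sentence.split(" ")[1]
-- ===== Notes on version B (the rewrite author's own statement) =====
-- stated objective: idiomatic
-- what changed: Replaces the two explicit character-scanning while-loops with a single tokenisation: split on the literal space character and index the second token.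
import Mathlib
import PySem

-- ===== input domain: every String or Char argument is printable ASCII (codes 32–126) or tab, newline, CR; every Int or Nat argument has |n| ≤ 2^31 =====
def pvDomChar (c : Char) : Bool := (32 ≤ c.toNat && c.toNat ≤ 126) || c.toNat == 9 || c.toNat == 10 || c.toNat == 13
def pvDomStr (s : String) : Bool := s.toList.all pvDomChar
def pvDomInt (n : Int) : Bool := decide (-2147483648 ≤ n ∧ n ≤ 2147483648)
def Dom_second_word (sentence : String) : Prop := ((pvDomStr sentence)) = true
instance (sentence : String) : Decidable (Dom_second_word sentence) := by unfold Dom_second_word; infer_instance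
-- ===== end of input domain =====

-- B replaces A's two explicit character-scanning loops by one split-on-space tokenisation and indexing the second token (idiomatic).


-- ===== PORT A =====
-- second while-loop of A: collect characters from `start` until the next space (or the end)
def swATake : List Char → List Char
  | [] => []
  | c :: rest => if c = ' ' then [] else c :: swATake rest

-- first while-loop of A: advance until the first space ([] = the IndexError case, excluded by Pre_)
def swASkip : List Char → List Char
  | [] => []
  | c :: rest => if c = ' ' then swATake rest else swASkip rest

def second_word (sentence : String) : String :=
  String.ofList (swASkip sentence.toList)

-- ===== PORT B =====
def second_word_alt (sentence : String) : String :=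
  match PySem.Str.split? sentence " " with
  | some parts => (PySem.List.pyGet? parts 1).getD ""   -- [1]; none (IndexError) excluded by Pre_
  | none => ""                                          -- unreachable: the separator " " is nonempty

-- ===== PRECONDITION & SPEC =====
-- Pre_ excludes exactly the strings without a space: A's first loop runs off the end (IndexError), B's [1] raises IndexError too.
def Pre_second_word (sentence : String) : Prop := ' ' ∈ sentence.toList
instance (sentence : String) : Decidable (Pre_second_word sentence) := by unfold Pre_second_word; infer_instance
def pvWitness_second_word : String := "a b"
def Spec_second_word (sentence : String) (out : String) : Prop := out = second_word_alt sentence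
instance (sentence : String) (out : String) : Decidable (Spec_second_word sentence out) := by unfold Spec_second_word; infer_instance

-- ===== CLAIM (what is proved, stated in full; the proofs are below) =====
def Claim_equal_second_word : Prop := ∀ (sentence : String), Dom_second_word sentence → Pre_second_word sentence → Spec_second_word sentence (second_word sentence)

-- ===== LEMMAS AND PROOFS =====

-- reference splitter: the tokens of a split on the single character ' '
def swTokens : List Char → List (List Char)
  | [] => [[]]
  | c :: rest => if c = ' ' then [] :: swTokens rest else (swTokens rest).modifyHead (c :: ·)

theorem modifyHead_id_list (l : List (List Char)) : l.modifyHead (fun x => x) = l := by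
  cases l <;> rfl

theorem swTokens_ne_nil (cs : List Char) : swTokens cs ≠ [] := by
  induction cs with
  | nil => simp [swTokens]
  | cons c rest ih =>
    simp only [swTokens]
    split
    · simp
    · cases h : swTokens rest with
      | nil => exact absurd h ih
      | cons t ts => simp [List.modifyHead]

theorem splitOn_go_spec : ∀ (fuel : Nat) (l cur : List Char) (acc : List (List Char)),
    l.length < fuel →
    PySem.Chars.splitOn.go [' '] fuel l cur acc
      = acc.reverse ++ (swTokens l).modifyHead (cur.reverse ++ ·) := by
  intro fuel
  induction fuel with
  | zero => intro l cur acc h; omega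
  | succ n ih =>
    intro l cur acc h
    cases l with
    | nil =>
      simp [PySem.Chars.splitOn.go, swTokens, List.modifyHead]
    | cons c rest =>
      by_cases hc : c = ' '
      · have : PySem.Chars.splitOn.go [' '] (n+1) (c :: rest) cur acc
            = PySem.Chars.splitOn.go [' '] n rest [] (cur.reverse :: acc) := by
          simp [PySem.Chars.splitOn.go, hc, List.isPrefixOf]
        rw [this, ih rest [] _ (by simpa using Nat.lt_of_succ_lt_succ h)]
        cases htk : swTokens rest <;> simp [swTokens, hc, List.modifyHead, htk]
      · have : PySem.Chars.splitOn.go [' '] (n+1) (c :: rest) cur acc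
            = PySem.Chars.splitOn.go [' '] n rest (c :: cur) acc := by
          simp only [PySem.Chars.splitOn.go, List.isPrefixOf]
          simp
          exact fun h' => absurd h'.symm hc
        rw [this, ih rest (c :: cur) acc (by simpa using Nat.lt_of_succ_lt_succ h)]
        simp only [swTokens, if_neg hc]
        congr 1
        obtain ⟨t, ts, hts⟩ : ∃ t ts, swTokens rest = t :: ts := by
          cases h : swTokens rest with
          | nil => exact absurd h (swTokens_ne_nil rest)
          | cons t ts => exact ⟨t, ts, rfl⟩
        simp [hts, List.modifyHead]

theorem splitOn_eq_swTokens (cs : List Char) :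
    PySem.Chars.splitOn cs [' '] = swTokens cs := by
  have := splitOn_go_spec (cs.length + 1) cs [] [] (by omega)
  simpa [PySem.Chars.splitOn, modifyHead_id_list] using this

theorem swTokens_head (cs : List Char) : (swTokens cs).head (swTokens_ne_nil cs) = swATake cs := by
  induction cs with
  | nil => simp [swTokens, swATake]
  | cons c rest ih =>
    by_cases hc : c = ' '
    · simp [swTokens, swATake, hc]
    · obtain ⟨t, ts, hts⟩ : ∃ t ts, swTokens rest = t :: ts := by
        cases h : swTokens rest with
        | nil => exact absurd h (swTokens_ne_nil rest)
        | cons t ts => exact ⟨t, ts, rfl⟩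
      simp only [swTokens, if_neg hc, swATake, hts, List.modifyHead, List.head_cons]
      have := ih
      simp [hts] at this
      simp [this]

theorem swTokens_second (cs : List Char) (h : ' ' ∈ cs) :
    (swTokens cs)[1]? = some (swASkip cs) := by
  induction cs with
  | nil => simp at h
  | cons c rest ih =>
    by_cases hc : c = ' '
    · have hhead : (swTokens rest)[0]? = some (swATake rest) := by
        obtain ⟨t, ts, hts⟩ : ∃ t ts, swTokens rest = t :: ts := by
          cases h' : swTokens rest with
          | nil => exact absurd h' (swTokens_ne_nil rest)
          | cons t ts => exact ⟨t, ts, rfl⟩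
        have := swTokens_head rest
        simp [hts] at this ⊢
        exact this
      simp [swTokens, hc, swASkip, hhead]
    · have hrest : ' ' ∈ rest := by
        cases h with
        | head => exact absurd rfl hc
        | tail _ h' => exact h'
      obtain ⟨t, ts, hts⟩ : ∃ t ts, swTokens rest = t :: ts := by
        cases h' : swTokens rest with
        | nil => exact absurd h' (swTokens_ne_nil rest)
        | cons t ts => exact ⟨t, ts, rfl⟩
      have := ih hrest
      simp only [swTokens, if_neg hc, swASkip, hts, List.modifyHead] at this ⊢
      simpa using this

-- ===== VERDICT (by name: the statement is the Claim_ definition above) =====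
theorem second_word_spec : Claim_equal_second_word := by
  intro sentence _ hpre
  unfold Spec_second_word second_word second_word_alt
  have hsep : PySem.Str.split? sentence " "
      = some ((PySem.Chars.splitOn sentence.toList [' ']).map String.ofList) := by
    simp [PySem.Str.split?, PySem.Chars.split?]
  have h2 : (swTokens sentence.toList)[1]? = some (swASkip sentence.toList) :=
    swTokens_second sentence.toList hpre
  have hget : PySem.List.pyGet? ((swTokens sentence.toList).map String.ofList) 1
      = ((swTokens sentence.toList).map String.ofList)[1]? := by
    have := PySem.List.pyGet?_natCast ((swTokens sentence.toList).map String.ofList) (n := 1)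
    simpa using this
  rw [hsep, splitOn_eq_swTokens]
  simp [hget, h2]
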